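-- pv_equiv track=rewrite | github.com/jmurrayrs/numeros_magicos_loteria | numeros_magicos_loteria.py | encontrar_numeros_magicos
-- ===== SOURCE A (Python) =====
-- def encontrar_numeros_magicos(apostas):
--     numeros_magicos = []
--     for numero in range(1, 61):
--         numero_magico = True
--         for aposta in apostas:
--             if numero in aposta:
--                 numero_magico = False
--                 break
--         if numero_magico:
--             numeros_magicos.append(numero)
--     return numeros_magicos
-- ===== SOURCE B (Python) =====
-- def encontrar_numeros_magicos(apostas):
--     resultado = set(range(1, 61))
--     for aposta in apostas:
--         resultado -= set(aposta)
--     return sorted(resultado)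
-- ===== Notes on version B (the rewrite author's own statement) =====
-- stated objective: simpler
-- what changed: Instead of iterating over candidates 1-60 and re-scanning every bet per candidate with a break flag, B builds the candidate set {1..60} once, shrinks it by set difference in one pass over the bets, and returns it sorted.
import Mathlib
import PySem

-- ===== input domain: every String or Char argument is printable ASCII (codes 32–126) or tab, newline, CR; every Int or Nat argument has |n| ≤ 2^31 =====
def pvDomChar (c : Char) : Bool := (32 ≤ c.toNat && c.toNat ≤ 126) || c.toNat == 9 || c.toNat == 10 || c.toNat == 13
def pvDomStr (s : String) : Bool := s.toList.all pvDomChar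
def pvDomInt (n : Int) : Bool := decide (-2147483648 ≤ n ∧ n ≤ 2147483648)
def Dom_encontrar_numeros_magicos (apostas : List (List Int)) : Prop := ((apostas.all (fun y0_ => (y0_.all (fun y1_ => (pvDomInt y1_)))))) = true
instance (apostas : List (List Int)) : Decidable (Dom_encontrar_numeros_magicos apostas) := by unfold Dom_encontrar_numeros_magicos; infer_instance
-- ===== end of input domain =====

-- B replaces A's candidate-by-candidate rescan of every bet with one pass over the
-- bets that shrinks a maintained candidate set, then sorts; equivalence proved below.


-- ===== PORT A =====
-- inner 'for aposta in apostas: if numero in aposta: numero_magico = False; break'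
def pvMagicoA (numero : Int) : List (List Int) → Bool
  | [] => true
  | aposta :: rest => if aposta.contains numero then false else pvMagicoA numero rest

def encontrar_numeros_magicos (apostas : List (List Int)) : List Int :=
  (PySem.List.pyRange 1 61 1).foldl
    (fun numeros_magicos numero =>
      if pvMagicoA numero apostas then numeros_magicos ++ [numero] else numeros_magicos)
    []

-- ===== PORT B =====
def encontrar_numeros_magicos_alt (apostas : List (List Int)) : List Int :=
  let resultado : PySem.Set Int := PySem.Set.ofList (PySem.List.pyRange 1 61 1)
  let resultado := apostas.foldl
    (fun s aposta => PySem.Set.diff s (PySem.Set.ofList aposta)) resultado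
  PySem.List.sorted resultado (fun x => x)

-- ===== PRECONDITION & SPEC =====
def Spec_encontrar_numeros_magicos (apostas : List (List Int)) (out : List Int) : Prop := out = encontrar_numeros_magicos_alt apostas
instance (apostas : List (List Int)) (out : List Int) : Decidable (Spec_encontrar_numeros_magicos apostas out) := by unfold Spec_encontrar_numeros_magicos; infer_instance

-- ===== CLAIM (what is proved, stated in full; the proofs are below) =====
def Claim_equal_encontrar_numeros_magicos : Prop := ∀ (apostas : List (List Int)), Dom_encontrar_numeros_magicos apostas → Spec_encontrar_numeros_magicos apostas (encontrar_numeros_magicos apostas)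

-- ===== LEMMAS AND PROOFS =====

-- A's inner loop with break decides "numero is in no aposta"
theorem pvMagicoA_eq_all (numero : Int) (apostas : List (List Int)) :
    pvMagicoA numero apostas = apostas.all (fun ap => !ap.contains numero) := by
  induction apostas with
  | nil => rfl
  | cons a rest ih =>
      simp only [pvMagicoA, List.all_cons, ih]
      cases a.contains numero <;> simp

-- B's fold of set differences is one filter by "in no aposta"
theorem pvDiff_foldl (apostas : List (List Int)) (L : List Int) :
    apostas.foldl (fun s aposta => PySem.Set.diff s (PySem.Set.ofList aposta)) L
      = L.filter (fun x => apostas.all (fun ap => !ap.contains x)) := by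
  induction apostas generalizing L with
  | nil => simp
  | cons a rest ih =>
      rw [List.foldl_cons]
      show List.foldl _ (PySem.Set.diff L (PySem.Set.ofList a)) rest = _
      rw [ih, PySem.Set.diff, List.filter_filter]
      apply List.filter_congr
      intro x _
      simp only [List.all_cons, Bool.and_comm]
      by_cases h : x ∈ a <;> simp [h, PySem.Set.mem_ofList]

-- ===== VERDICT (by name: the statement is the Claim_ definition above) =====
theorem encontrar_numeros_magicos_spec : Claim_equal_encontrar_numeros_magicos := by
  intro apostas _
  unfold Spec_encontrar_numeros_magicos encontrar_numeros_magicos encontrar_numeros_magicos_alt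
  simp only [PySem.Set.ofList_eq_self_of_nodup _ (PySem.List.nodup_pyRange_one 1 61),
    pvDiff_foldl]
  have hfold := PySem.List.foldl_append_if
      (fun numero => pvMagicoA numero apostas) (fun x => x) (PySem.List.pyRange 1 61 1) []
  simp only [List.map_id', List.nil_append] at hfold
  rw [hfold]
  rw [PySem.List.sorted_eq_self_of_pairwise _ _
      (((PySem.List.pairwise_lt_pyRange_one 1 61).filter _).imp (fun h => le_of_lt h))]
  apply List.filter_congr
  intro x _
  exact pvMagicoA_eq_all x apostas
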